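-- pv_equiv track=rewrite | github.com/Fay321/leetcode-exercise | solution/problem 38.py | transform
-- ===== SOURCE A (Python) =====
-- def transform(string):
--     '''计算字母出现次数'''
--     count = dict()
--     for e in string:
--         if e not in count:
--             count[e] = 1
--         else:
--             count[e] += 1
--
--     out_string = ''
--     for key in sorted(count):
--         out_string += key+str(count[key])
--     return out_string
-- ===== SOURCE B (Python) =====
-- def transform(string):
--     '''计算字母出现次数'''
--     def runs(s):
--         if not s:
--             return []
--         c = s[0]
--         k = 1
--         while k < len(s) and s[k] == c:
--             k += 1
--         return [c + str(k)] + runs(s[k:])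
--     return ''.join(runs(sorted(string)))
-- ===== Notes on version B (the rewrite author's own statement) =====
-- stated objective: idiomatic
-- what changed: B keeps no frequency dict at all: it sorts the characters once and emits each run of equal characters as char+run-length, joining the pieces, instead of A's dict-counting pass followed by a sorted-keys pass with repeated string concatenation.
import Mathlib
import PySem

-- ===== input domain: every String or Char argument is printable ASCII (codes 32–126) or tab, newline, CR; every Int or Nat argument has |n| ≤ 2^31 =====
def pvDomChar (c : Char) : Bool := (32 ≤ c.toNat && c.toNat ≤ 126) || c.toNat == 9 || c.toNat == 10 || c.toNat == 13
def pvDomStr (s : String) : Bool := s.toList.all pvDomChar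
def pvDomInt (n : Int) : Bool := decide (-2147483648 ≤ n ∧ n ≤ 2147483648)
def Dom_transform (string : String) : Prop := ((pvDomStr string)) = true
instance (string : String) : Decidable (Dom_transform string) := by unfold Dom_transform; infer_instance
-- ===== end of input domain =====

-- B replaces A's frequency dict + sorted-keys pass by sorting the characters once and
-- emitting run lengths of the sorted sequence (idiomatic sort-and-group; no count table).

-- ===== PORT A =====
def transform (string : String) : String :=
  let count := string.toList.foldl
    (fun d e => if d.contains e = false then d.insert e (1 : Int) else d.modify e 0 (· + 1))
    PySem.Dict.empty
  (PySem.List.sorted count.keys (fun k => k)).foldl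
    (fun out key => out ++ (String.ofList [key] ++ PySem.Int.toStr (count.getD key 0))) ""

-- ===== PORT B =====
-- the inner 'while' of Source B counts the run of s[0]: k = 1 + length of the run in the tail;
-- s[k:] is then the tail with that run dropped.
def transformRuns (s : List Char) : List String :=
  match s with
  | [] => []
  | c :: rest =>
      let k : Nat := 1 + (rest.takeWhile (fun x => x == c)).length
      (String.ofList [c] ++ PySem.Int.toStr (k : Int)) ::
        transformRuns (rest.dropWhile (fun x => x == c))
  termination_by s.length
  decreasing_by
    simpa using Nat.lt_succ_of_le (List.length_dropWhile_le _ rest)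

def transform_alt (string : String) : String :=
  PySem.Str.join "" (transformRuns (PySem.List.sorted string.toList (fun c => c)))

-- ===== PRECONDITION & SPEC =====
def Spec_transform (string : String) (out : String) : Prop := out = transform_alt string
instance (string : String) (out : String) : Decidable (Spec_transform string out) := by unfold Spec_transform; infer_instance

-- ===== CLAIM (what is proved, stated in full; the proofs are below) =====
def Claim_equal_transform : Prop := ∀ (string : String), Dom_transform string → Spec_transform string (transform string)

-- ===== LEMMAS AND PROOFS =====

-- the distinct characters of s, in the order of the runs of transformRuns
def runHeads (s : List Char) : List Char :=
  match s with
  | [] => []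
  | c :: rest => c :: runHeads (rest.dropWhile (fun x => x == c))
  termination_by s.length
  decreasing_by
    simpa using Nat.lt_succ_of_le (List.length_dropWhile_le _ rest)

theorem mem_runHeads (s : List Char) (x : Char) : x ∈ runHeads s ↔ x ∈ s := by
  induction s using runHeads.induct with
  | case1 => simp [runHeads]
  | case2 c rest ih =>
    rw [runHeads]
    simp only [List.mem_cons, ih]
    constructor
    · rintro (rfl | hx)
      · exact .inl rfl
      · exact .inr ((List.dropWhile_sublist _).mem hx)
    · rintro (rfl | hx)
      · exact .inl rfl
      · rcases List.mem_append.1 ((List.takeWhile_append_dropWhile (p := fun x => x == c) (l := rest)).symm ▸ hx) with h1 | h2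
        · exact .inl (by simpa using List.mem_takeWhile_imp h1)
        · exact .inr h2

theorem lt_of_mem_dropWhile (c : Char) (rest : List Char) (h : (c :: rest).Pairwise (· ≤ ·))
    (x : Char) (hx : x ∈ rest.dropWhile (fun y => y == c)) : c < x := by
  have hle : c ≤ x := (List.pairwise_cons.1 h).1 x ((List.dropWhile_sublist _).mem hx)
  rcases lt_or_eq_of_le hle with hlt | heq
  · exact hlt
  · exfalso
    subst heq
    rcases hd : rest.dropWhile (fun y => y == c) with _ | ⟨d, ds⟩
    · simp [hd] at hx
    · have hdx : ¬ (d == c) = true := by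
        have := List.head_dropWhile_not (fun y => y == c) (l := rest) (by simp [hd])
        simpa [hd] using this
      have hdrest : d ∈ rest := (List.dropWhile_sublist _).mem (by rw [hd]; exact List.mem_cons_self ..)
      have hxd : c ≤ d := (List.pairwise_cons.1 h).1 d hdrest
      have hsorted : (d :: ds).Pairwise (· ≤ ·) :=
        hd ▸ ((List.pairwise_cons.1 h).2.sublist (List.dropWhile_sublist (fun y => y == c)))
      rw [hd] at hx
      rcases List.mem_cons.1 hx with heq2 | hx'
      · exact hdx (by simp [heq2.symm])
      · have h1 : d ≤ c := (List.pairwise_cons.1 hsorted).1 c hx'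
        exact hdx (by simp [le_antisymm h1 hxd])

theorem pairwise_runHeads (s : List Char) (h : s.Pairwise (· ≤ ·)) :
    (runHeads s).Pairwise (· < ·) := by
  induction s using runHeads.induct with
  | case1 => simp [runHeads]
  | case2 c rest ih =>
    rw [runHeads]
    refine List.pairwise_cons.2 ⟨?_, ih ((List.pairwise_cons.1 h).2.sublist (List.dropWhile_sublist _))⟩
    intro x hx
    exact lt_of_mem_dropWhile c rest h x ((mem_runHeads _ x).1 hx)

theorem count_head_sorted (c : Char) (rest : List Char) (h : (c :: rest).Pairwise (· ≤ ·)) :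
    (c :: rest).count c = 1 + (rest.takeWhile (fun x => x == c)).length := by
  have hsplit := List.takeWhile_append_dropWhile (p := fun x => x == c) (l := rest)
  have ht : (rest.takeWhile (fun x => x == c)).count c = (rest.takeWhile (fun x => x == c)).length := by
    rw [List.count_eq_length]
    intro b hb
    have := List.mem_takeWhile_imp hb
    have hb2 : b = c := by simpa using this
    exact hb2.symm
  have hd : (rest.dropWhile (fun x => x == c)).count c = 0 := by
    rw [List.count_eq_zero]
    intro hc
    exact absurd (lt_of_mem_dropWhile c rest h c hc) (lt_irrefl c)
  have hr : rest.count c = (rest.takeWhile (fun x => x == c)).length := by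
    conv_lhs => rw [← hsplit]
    rw [List.count_append, ht, hd]
    omega
  simp [hr]
  omega

theorem count_tail_sorted (c : Char) (rest : List Char) (h : (c :: rest).Pairwise (· ≤ ·))
    (k : Char) (hk : k ∈ rest.dropWhile (fun x => x == c)) :
    (rest.dropWhile (fun x => x == c)).count k = (c :: rest).count k := by
  have hkc : k ≠ c := ne_of_gt (lt_of_mem_dropWhile c rest h k hk)
  have ht : (rest.takeWhile (fun x => x == c)).count k = 0 := by
    rw [List.count_eq_zero]
    intro hc
    exact hkc (by simpa using List.mem_takeWhile_imp hc)
  have hsplit := List.takeWhile_append_dropWhile (p := fun x => x == c) (l := rest)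
  have hr : rest.count k = (rest.dropWhile (fun x => x == c)).count k := by
    conv_lhs => rw [← hsplit]
    rw [List.count_append, ht]
    omega
  simp [List.count_cons, hr]
  exact fun hce => hkc hce.symm

theorem transformRuns_eq_map (s : List Char) (h : s.Pairwise (· ≤ ·)) :
    transformRuns s = (runHeads s).map
      (fun c => String.ofList [c] ++ PySem.Int.toStr ((s.count c : Nat) : Int)) := by
  induction s using runHeads.induct with
  | case1 => simp [transformRuns, runHeads]
  | case2 c rest ih =>
    rw [transformRuns, runHeads]
    have htail : (rest.dropWhile (fun x => x == c)).Pairwise (· ≤ ·) :=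
      (List.pairwise_cons.1 h).2.sublist (List.dropWhile_sublist _)
    rw [List.map_cons, ih htail]
    congr 1
    · rw [count_head_sorted c rest h]
    · refine List.map_congr_left ?_
      intro k hk
      rw [count_tail_sorted c rest h k ((mem_runHeads _ k).1 hk)]

theorem intersperse_nil_flatten (ls : List (List Char)) :
    (List.intersperse [] ls).flatten = ls.flatten := by
  induction ls with
  | nil => rfl
  | cons p rest ih =>
    cases rest with
    | nil => simp
    | cons q r => simp_all [List.intersperse]

theorem join_empty_cons (parts : List String) (p : String) :
    PySem.Str.join "" (p :: parts) = p ++ PySem.Str.join "" parts := by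
  simp [PySem.Str.join, PySem.Chars.join, List.intercalate, intersperse_nil_flatten]

theorem join_empty_nil : PySem.Str.join "" [] = "" := by
  simp [PySem.Str.join, PySem.Chars.join, List.intercalate]

theorem foldl_append_eq_join (g : Char → String) (ks : List Char) (a : String) :
    List.foldl (fun out k => out ++ g k) a ks = a ++ PySem.Str.join "" (ks.map g) := by
  induction ks generalizing a with
  | nil => simp [join_empty_nil]
  | cons k ks ih => simp [List.foldl_cons, ih, join_empty_cons, String.append_assoc]

-- ===== VERDICT (by name: the statement is the Claim_ definition above) =====

theorem transform_spec : Claim_equal_transform := by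
  intro string _
  unfold Spec_transform transform transform_alt
  have hfun : (fun (d : PySem.Dict Char Int) e =>
        if d.contains e = false then d.insert e (1 : Int) else d.modify e 0 (· + 1))
      = fun (d : PySem.Dict Char Int) e => d.insert e (d.getD e 0 + 1) := by
    funext d e
    by_cases hc : d.contains e = true
    · simp [hc, PySem.Dict.modify]
    · have hc' : d.contains e = false := by simpa using hc
      rw [hc']
      simp [PySem.Dict.getD_of_not_contains d 0 hc']
  simp only [hfun, PySem.Dict.foldl_insert_getD_add_one_eq_counter, PySem.Dict.keys_counter]
  have hK : PySem.List.sorted (PySem.Set.ofList string.toList) (fun k => k)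
      = runHeads (PySem.List.sorted string.toList (fun c => c)) := by
    apply PySem.List.sorted_eq_of_perm_of_pairwise_lt
    · refine (List.perm_ext_iff_of_nodup ?_ (PySem.Set.nodup_ofList _)).2 ?_
      · exact ((pairwise_runHeads _ (PySem.List.sorted_pairwise _ _)).imp ne_of_lt)
      · intro a
        rw [mem_runHeads, PySem.List.mem_sorted, PySem.Set.mem_ofList]
    · exact pairwise_runHeads _ (PySem.List.sorted_pairwise _ _)
  rw [hK, foldl_append_eq_join, transformRuns_eq_map _ (PySem.List.sorted_pairwise _ _)]
  have hmap : ∀ k ∈ runHeads (PySem.List.sorted string.toList (fun c => c)),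
      String.ofList [k] ++ PySem.Int.toStr ((PySem.Dict.counter string.toList).getD k 0)
      = String.ofList [k] ++ PySem.Int.toStr (((PySem.List.sorted string.toList (fun c => c)).count k : Nat) : Int) := by
    intro k _
    rw [PySem.Dict.getD_counter, (PySem.List.sorted_perm string.toList (fun c => c) false).count_eq]
  rw [List.map_congr_left hmap]
  simp
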